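-- pv_equiv track=rewrite | github.com/VoXc2/dealix | auto_client_acquisition/strategy_os/use_case_scoring.py | roadmap_buckets
-- ===== SOURCE A (Python) =====
-- def roadmap_buckets(top_names: list[str]) -> dict[str, list[str]]:
--     """
--     Placeholder 30/60/90 structure — assigns up to nine use cases across horizons.
--
--     Real roadmaps should be edited per client; this keeps a deterministic default.
--     """
--     names = list(top_names[:9])
--     out: dict[str, list[str]] = {"days_30": [], "days_60": [], "days_90": []}
--     for i, n in enumerate(names):
--         if i < 3:
--             out["days_30"].append(n)
--         elif i < 6:
--             out["days_60"].append(n)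
--         else:
--             out["days_90"].append(n)
--     return out
-- ===== SOURCE B (Python) =====
-- def roadmap_buckets(top_names: list[str]) -> dict[str, list[str]]:
--     """Direct-slice rewrite: each horizon bucket is a slice of the input."""
--     return {
--         "days_30": list(top_names[:3]),
--         "days_60": list(top_names[3:6]),
--         "days_90": list(top_names[6:9]),
--     }
-- ===== Notes on version B (the rewrite author's own statement) =====
-- stated objective: simpler
-- what changed: Replaced the enumerate loop with if/elif bucket dispatch by a direct construction of the dict from three slices top_names[:3], [3:6], [6:9].
import Mathlib
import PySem

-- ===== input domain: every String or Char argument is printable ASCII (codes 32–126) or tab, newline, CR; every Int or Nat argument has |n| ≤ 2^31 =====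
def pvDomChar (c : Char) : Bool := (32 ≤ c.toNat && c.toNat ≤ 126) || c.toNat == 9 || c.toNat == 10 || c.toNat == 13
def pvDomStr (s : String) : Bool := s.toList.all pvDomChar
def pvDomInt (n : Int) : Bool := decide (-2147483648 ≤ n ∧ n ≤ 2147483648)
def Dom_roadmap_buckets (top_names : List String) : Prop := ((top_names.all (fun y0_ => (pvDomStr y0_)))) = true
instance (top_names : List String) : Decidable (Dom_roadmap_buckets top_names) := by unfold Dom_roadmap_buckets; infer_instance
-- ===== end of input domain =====

-- ===== PORT A =====
-- B is simpler: the dict is built directly from three slices instead of an enumerate loop.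
def roadmap_buckets (top_names : List String) : List (String × List String) :=
  let names := PySem.List.slice top_names none (some 9)
  let out : PySem.Dict String (List String) :=
    PySem.Dict.insert (PySem.Dict.insert (PySem.Dict.insert PySem.Dict.empty "days_30" []) "days_60" []) "days_90" []
  PySem.Dict.items ((PySem.List.enumerate names 0).foldl (fun out p =>
    if p.1 < 3 then PySem.Dict.modify out "days_30" [] (fun l => l ++ [p.2])
    else if p.1 < 6 then PySem.Dict.modify out "days_60" [] (fun l => l ++ [p.2])
    else PySem.Dict.modify out "days_90" [] (fun l => l ++ [p.2])) out)

-- ===== PORT B =====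
def roadmap_buckets_alt (top_names : List String) : List (String × List String) :=
  [("days_30", PySem.List.slice top_names none (some 3)),
   ("days_60", PySem.List.slice top_names (some 3) (some 6)),
   ("days_90", PySem.List.slice top_names (some 6) (some 9))]

-- ===== PRECONDITION & SPEC =====
def Spec_roadmap_buckets (top_names : List String) (out : List (String × List String)) : Prop := out = roadmap_buckets_alt top_names
instance (top_names : List String) (out : List (String × List String)) : Decidable (Spec_roadmap_buckets top_names out) := by unfold Spec_roadmap_buckets; infer_instance

-- ===== CLAIM (what is proved, stated in full; the proofs are below) =====
def Claim_equal_roadmap_buckets : Prop := ∀ (top_names : List String), Dom_roadmap_buckets top_names → Spec_roadmap_buckets top_names (roadmap_buckets top_names)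

-- ===== LEMMAS AND PROOFS =====

-- ===== VERDICT (by name: the statement is the Claim_ definition above) =====
theorem roadmap_buckets_spec : Claim_equal_roadmap_buckets := by
  intro l _
  unfold Spec_roadmap_buckets
  match l with
  | [] =>
    show _ = _
    simp [roadmap_buckets, roadmap_buckets_alt, PySem.List.slice, PySem.List.clampIdx,
      PySem.List.enumerate, PySem.Dict.modify, PySem.Dict.insert, PySem.Dict.empty, PySem.Dict.items, PySem.Dict.getD, PySem.Dict.get?]
  | [a] =>
    show _ = _
    simp [roadmap_buckets, roadmap_buckets_alt, PySem.List.slice, PySem.List.clampIdx,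
      PySem.List.enumerate, PySem.Dict.modify, PySem.Dict.insert, PySem.Dict.empty, PySem.Dict.items, PySem.Dict.getD, PySem.Dict.get?]
  | [a,b] =>
    show _ = _
    simp [roadmap_buckets, roadmap_buckets_alt, PySem.List.slice, PySem.List.clampIdx,
      PySem.List.enumerate, PySem.Dict.modify, PySem.Dict.insert, PySem.Dict.empty, PySem.Dict.items, PySem.Dict.getD, PySem.Dict.get?]
  | [a,b,c] =>
    show _ = _
    simp [roadmap_buckets, roadmap_buckets_alt, PySem.List.slice, PySem.List.clampIdx,
      PySem.List.enumerate, PySem.Dict.modify, PySem.Dict.insert, PySem.Dict.empty, PySem.Dict.items, PySem.Dict.getD, PySem.Dict.get?]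
  | [a,b,c,d] =>
    show _ = _
    simp [roadmap_buckets, roadmap_buckets_alt, PySem.List.slice, PySem.List.clampIdx,
      PySem.List.enumerate, PySem.Dict.modify, PySem.Dict.insert, PySem.Dict.empty, PySem.Dict.items, PySem.Dict.getD, PySem.Dict.get?]
  | [a,b,c,d,e] =>
    show _ = _
    simp [roadmap_buckets, roadmap_buckets_alt, PySem.List.slice, PySem.List.clampIdx,
      PySem.List.enumerate, PySem.Dict.modify, PySem.Dict.insert, PySem.Dict.empty, PySem.Dict.items, PySem.Dict.getD, PySem.Dict.get?]
  | [a,b,c,d,e,f] =>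
    show _ = _
    simp [roadmap_buckets, roadmap_buckets_alt, PySem.List.slice, PySem.List.clampIdx,
      PySem.List.enumerate, PySem.Dict.modify, PySem.Dict.insert, PySem.Dict.empty, PySem.Dict.items, PySem.Dict.getD, PySem.Dict.get?]
  | [a,b,c,d,e,f,g] =>
    show _ = _
    simp [roadmap_buckets, roadmap_buckets_alt, PySem.List.slice, PySem.List.clampIdx,
      PySem.List.enumerate, PySem.Dict.modify, PySem.Dict.insert, PySem.Dict.empty, PySem.Dict.items, PySem.Dict.getD, PySem.Dict.get?]
  | [a,b,c,d,e,f,g,h] =>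
    show _ = _
    simp [roadmap_buckets, roadmap_buckets_alt, PySem.List.slice, PySem.List.clampIdx,
      PySem.List.enumerate, PySem.Dict.modify, PySem.Dict.insert, PySem.Dict.empty, PySem.Dict.items, PySem.Dict.getD, PySem.Dict.get?]
  | a::b::c::d::e::f::g::h::i::rest =>
    show _ = _
    simp [roadmap_buckets, roadmap_buckets_alt, PySem.List.slice, PySem.List.clampIdx,
      PySem.List.enumerate, PySem.Dict.modify, PySem.Dict.insert, PySem.Dict.empty, PySem.Dict.items, PySem.Dict.getD, PySem.Dict.get?]
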